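-- pv_equiv track=rewrite | github.com/Chemokoren/Algorithms-1 | GFG/Arrays/Rotation/find_max_sum_with_only_rotations_on_array.py | maxSumEfficient
-- ===== SOURCE A (Python) =====
-- def maxSumEfficient(arr, n):
--
--     # compute sum of all array elements
--     cum_sum = 0
--
--     for i in range(0, n):
--         cum_sum += arr[i]
--
--     # compute sum of i * arr[i] for
--     # initial configuration.
--     curr_val = 0
--
--     for i in range(0, n):
--         curr_val += i* arr[i]
--
--     # initialize result
--     res = curr_val
--
--     # compute values for other iterations
--     for i in range(1, n):
--
--         # compute next value using previous value in O(1) time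
--         # value in O(1) time
--         next_val =(curr_val - (cum_sum - arr[i-1]) + arr[i-1] * (n-1))
--
--         # update current value
--         curr_val = next_val
--
--         # update result if required
--         res =max(res, next_val)
--     return res
-- ===== SOURCE B (Python) =====
-- def maxSumEfficient(arr, n):
--     if n <= 0:
--         return 0
--     best = None
--     for j in range(n):
--         s = 0
--         for i in range(n):
--             s += i * arr[(i + j) % n]
--         if best is None or s > best:
--             best = s
--     return best
-- ===== Notes on version B (the rewrite author's own statement) =====
-- stated objective: simpler
-- what changed: Replaces A's O(n) incremental recurrence (prefix sums + O(1) update per rotation) with a direct nested recompute: for each rotation j, sum i*arr[(i+j)%n] from scratch and keep the running maximum.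
import Mathlib
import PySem

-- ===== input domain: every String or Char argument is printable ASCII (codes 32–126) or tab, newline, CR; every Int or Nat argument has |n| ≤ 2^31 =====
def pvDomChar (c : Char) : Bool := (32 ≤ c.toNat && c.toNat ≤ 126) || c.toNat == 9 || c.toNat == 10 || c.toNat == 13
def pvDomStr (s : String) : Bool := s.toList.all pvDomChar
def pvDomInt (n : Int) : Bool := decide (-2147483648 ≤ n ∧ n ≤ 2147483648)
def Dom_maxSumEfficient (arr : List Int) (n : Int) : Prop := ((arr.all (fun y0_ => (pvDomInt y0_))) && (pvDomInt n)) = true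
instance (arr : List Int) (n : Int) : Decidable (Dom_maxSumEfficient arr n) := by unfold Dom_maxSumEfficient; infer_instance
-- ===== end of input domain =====

-- B recomputes each rotation's score with a direct nested sum instead of A's
-- incremental O(1)-per-rotation update; objective: simpler (no speed claim).

-- ===== PORT A =====
def maxSumEfficient (arr : List Int) (n : Int) : Int :=
  let cum_sum := (PySem.List.pyRange 0 n 1).foldl (fun acc i => acc + PySem.List.pyGetD arr i 0) 0
  let curr_val := (PySem.List.pyRange 0 n 1).foldl (fun acc i => acc + i * PySem.List.pyGetD arr i 0) 0
  let res := curr_val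
  let st := (PySem.List.pyRange 1 n 1).foldl (fun (p : Int × Int) i =>
      let next_val := p.1 - (cum_sum - PySem.List.pyGetD arr (i - 1) 0)
                      + PySem.List.pyGetD arr (i - 1) 0 * (n - 1)
      (next_val, max p.2 next_val)) (curr_val, res)
  st.2

-- ===== PORT B =====
def maxSumEfficient_alt (arr : List Int) (n : Int) : Int :=
  if n ≤ 0 then 0
  else
    let best := (PySem.List.pyRange 0 n 1).foldl (fun (best : Option Int) j =>
        let s := (PySem.List.pyRange 0 n 1).foldl
            (fun s i => s + i * PySem.List.pyGetD arr (PySem.Int.mod (i + j) n) 0) 0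
        match best with
        | none => some s
        | some b => if s > b then some s else some b) none
    best.getD 0

-- ===== PRECONDITION & SPEC =====
-- A indexes arr[i] for every i in range(n): it raises IndexError iff n > len(arr).
def Pre_maxSumEfficient (arr : List Int) (n : Int) : Prop := n ≤ (arr.length : Int)
instance (arr : List Int) (n : Int) : Decidable (Pre_maxSumEfficient arr n) := by
  unfold Pre_maxSumEfficient; infer_instance
def pvWitness_maxSumEfficient : List Int × Int := ([1, -2, 3], 3)

def Spec_maxSumEfficient (arr : List Int) (n : Int) (out : Int) : Prop := out = maxSumEfficient_alt arr n
instance (arr : List Int) (n : Int) (out : Int) : Decidable (Spec_maxSumEfficient arr n out) := by unfold Spec_maxSumEfficient; infer_instance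

-- ===== CLAIM (what is proved, stated in full; the proofs are below) =====
def Claim_equal_maxSumEfficient : Prop := ∀ (arr : List Int) (n : Int), Dom_maxSumEfficient arr n → Pre_maxSumEfficient arr n → Spec_maxSumEfficient arr n (maxSumEfficient arr n)

-- ===== LEMMAS AND PROOFS =====

-- weighted sum: ws k [x0, x1, …] = k*x0 + (k+1)*x1 + …
def ws (k : Int) : List Int → Int
  | [] => 0
  | x :: t => k * x + ws (k + 1) t

-- running maximum of rotation scores 0..j of l
def Mx (l : List Int) : Nat → Int
  | 0 => ws 0 l
  | j + 1 => max (Mx l j) (ws 0 (l.rotate (j + 1)))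

theorem ws_shift (xs : List Int) : ∀ k : Int, ws (k + 1) xs = ws k xs + xs.sum := by
  induction xs with
  | nil => intro k; simp [ws]
  | cons x t ih => intro k; simp [ws, ih (k + 1)]; ring

theorem ws_append_singleton (t : List Int) (x : Int) :
    ∀ k : Int, ws k (t ++ [x]) = ws k t + (k + t.length) * x := by
  induction t with
  | nil => intro k; simp [ws]
  | cons y u ih =>
    intro k
    simp [ws, ih (k + 1)]
    ring

theorem ws_eq_sum (xs : List Int) :
    ∀ k : Int, ws k xs = ((List.range xs.length).map (fun (i : Nat) => (k + (i : Int)) * xs.getD i 0)).sum := by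
  induction xs with
  | nil => intro k; simp [ws]
  | cons x t ih =>
    intro k
    simp only [List.length_cons, List.range_succ_eq_map, List.map_cons, List.map_map,
      List.sum_cons, ws]
    rw [ih (k + 1)]
    congr 1
    · simp
    · refine congrArg List.sum (List.map_congr_left ?_)
      intro i _
      simp only [Function.comp, Nat.succ_eq_add_one, List.getD_cons_succ]
      push_cast
      ring

theorem sum_eq_map_range (xs : List Int) :
    xs.sum = ((List.range xs.length).map (fun (i : Nat) => xs.getD i 0)).sum := by
  induction xs with
  | nil => simp
  | cons x t ih =>
    simp only [List.length_cons, List.range_succ_eq_map, List.map_cons, List.map_map,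
      List.sum_cons]
    rw [ih]
    congr 1

-- rotation-score recurrence: the mathematical content of A's O(1) update
theorem rot_succ (l : List Int) (j : Nat) (hj : j < l.length) :
    ws 0 (l.rotate (j + 1))
      = ws 0 (l.rotate j) - (l.sum - l.getD j 0) + l.getD j 0 * ((l.length : Int) - 1) := by
  have hlen : (l.rotate j).length = l.length := List.length_rotate l j
  have hne : l ≠ [] := by intro h; subst h; simp at hj
  obtain ⟨x, t, hr⟩ : ∃ x t, l.rotate j = x :: t := by
    cases h : l.rotate j with
    | nil => exfalso; rw [h] at hlen; simp at hlen; omega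
    | cons a b => exact ⟨a, b, rfl⟩
  have hsum : (l.rotate j).sum = l.sum := (l.rotate_perm j).sum_eq
  have hx : x = l.getD j 0 := by
    have h0 := List.getElem_rotate l j 0 (by rw [hlen]; omega)
    simp only [hr, List.getElem_cons_zero, Nat.zero_add, Nat.mod_eq_of_lt hj] at h0
    rw [h0, List.getD_eq_getElem]
  have hrot1 : l.rotate (j + 1) = t ++ [x] := by
    have : l.rotate (j + 1) = (l.rotate j).rotate 1 := by
      rw [List.rotate_rotate]
    rw [this, hr]
    simpa using List.rotate_cons_succ t x 0
  have htlen : (t.length : Int) = (l.length : Int) - 1 := by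
    have : t.length + 1 = l.length := by
      have := hlen; rw [hr] at this; simpa using this
    omega
  have htsum : t.sum = l.sum - x := by
    have : (x :: t).sum = l.sum := by rw [← hr]; exact hsum
    simp at this; omega
  have hws : ws 0 (l.rotate j) = ws 0 t + t.sum := by
    rw [hr]
    simp [ws]
    simpa using ws_shift t 0
  rw [hrot1, ws_append_singleton t x 0, hws, htsum, htlen, ← hx]
  ring

-- A's third loop computes (score j, Mx l j) after indices 1..j
theorem A_loop (l : List Int) (hl : l ≠ []) (cum : Int) (hc : cum = l.sum) :
    ∀ j : Nat, j < l.length →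
      (PySem.List.pyRange 1 ((j : Int) + 1) 1).foldl (fun (p : Int × Int) i =>
        let next_val := p.1 - (cum - PySem.List.pyGetD l (i - 1) 0)
                        + PySem.List.pyGetD l (i - 1) 0 * ((l.length : Int) - 1)
        (next_val, max p.2 next_val)) (ws 0 l, ws 0 l)
      = (ws 0 (l.rotate j), Mx l j) := by
  intro j
  induction j with
  | zero =>
    intro _
    rw [PySem.List.pyRange_one_eq_nil (by norm_num)]
    simp [Mx]
  | succ j ih =>
    intro hj
    have hj' : j < l.length := by omega
    rw [show ((j + 1 : Nat) : Int) + 1 = (((j : Int) + 1) + 1) from by push_cast; ring,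
      PySem.List.pyRange_one_succ_right (by omega), List.foldl_append, ih hj']
    simp only [List.foldl_cons, List.foldl_nil]
    have hidx : PySem.List.pyGetD l ((j : Int) + 1 - 1) 0 = l.getD j 0 := by
      rw [show ((j : Int) + 1 - 1) = (j : Int) by ring]
      simp [PySem.List.pyGetD_natCast]
    rw [hidx, hc, Prod.mk.injEq]
    constructor
    · rw [rot_succ l j hj']
    · rw [Mx, rot_succ l j hj']

-- B's inner loop equals the rotation score
theorem B_inner (arr : List Int) (m : Nat) (hm : 0 < m) (hlen : m ≤ arr.length) (j : Nat) :
    (PySem.List.pyRange 0 (m : Int) 1).foldl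
        (fun s i => s + i * PySem.List.pyGetD arr (PySem.Int.mod (i + (j : Int)) (m : Int)) 0) 0
      = ws 0 ((arr.take m).rotate j) := by
  set l := arr.take m with hl
  have hml : l.length = m := by simp [hl]; omega
  have key : ∀ k : Nat, k ≤ m →
      (PySem.List.pyRange 0 (k : Int) 1).foldl
        (fun s i => s + i * PySem.List.pyGetD arr (PySem.Int.mod (i + (j : Int)) (m : Int)) 0) 0
      = ((List.range k).map (fun (i : Nat) => (i : Int) * (l.rotate j).getD i 0)).sum := by
    intro k
    induction k with
    | zero => intro _; rw [show ((0:Nat) : Int) = 0 by norm_num, PySem.List.pyRange_one_eq_nil (by norm_num)]; simp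
    | succ k ih =>
      intro hk
      rw [show ((k + 1 : Nat) : Int) = (k : Int) + 1 by push_cast; ring,
        PySem.List.pyRange_one_succ_right (by omega), List.foldl_append, ih (by omega),
        List.range_succ, List.map_append, List.sum_append]
      simp only [List.foldl_cons, List.foldl_nil, List.map_cons, List.map_nil, List.sum_cons,
        List.sum_nil]
      congr 1
      rw [show ((k : Int) + (j : Int)) = ((k + j : Nat) : Int) by push_cast; ring,
        PySem.Int.mod_natCast]
      have hmod : (k + j) % m < m := Nat.mod_lt _ hm
      have h1 : PySem.List.pyGetD arr (((k + j) % m : Nat) : Int) 0 = arr.getD ((k + j) % m) 0 := by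
        rw [PySem.List.pyGetD_natCast]
      have h2 : arr.getD ((k + j) % m) 0 = l.getD ((k + j) % m) 0 := by
        rw [List.getD_eq_getElem arr _ (by omega), List.getD_eq_getElem l _ (by omega)]
        simp [hl, List.getElem_take]
      have h3 : (l.rotate j).getD k 0 = l.getD ((k + j) % m) 0 := by
        have hk' : k < (l.rotate j).length := by rw [List.length_rotate, hml]; omega
        rw [List.getD_eq_getElem _ _ hk', List.getD_eq_getElem l _ (by omega)]
        have := List.getElem_rotate l j k hk'
        simpa [hml] using this
      rw [h1, h2, ← h3]
      ring
  have := key m (le_refl m)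
  rw [this, ws_eq_sum]
  rw [List.length_rotate, hml]
  apply congrArg
  apply List.map_congr_left
  intro i _
  simp

-- B's outer loop accumulates Mx
theorem B_outer (arr : List Int) (m : Nat) (hm : 0 < m) (hlen : m ≤ arr.length) :
    ∀ j : Nat, j < m →
      (PySem.List.pyRange 0 ((j : Int) + 1) 1).foldl (fun (best : Option Int) jj =>
        match best with
        | none => some ((PySem.List.pyRange 0 (m : Int) 1).foldl
            (fun s i => s + i * PySem.List.pyGetD arr (PySem.Int.mod (i + jj) (m : Int)) 0) 0)
        | some b => if (PySem.List.pyRange 0 (m : Int) 1).foldl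
            (fun s i => s + i * PySem.List.pyGetD arr (PySem.Int.mod (i + jj) (m : Int)) 0) 0 > b
            then some ((PySem.List.pyRange 0 (m : Int) 1).foldl
            (fun s i => s + i * PySem.List.pyGetD arr (PySem.Int.mod (i + jj) (m : Int)) 0) 0)
            else some b) none
      = some (Mx (arr.take m) j) := by
  intro j
  induction j with
  | zero =>
    intro _
    rw [show ((0:Nat) : Int) + 1 = 0 + 1 from by norm_num, PySem.List.pyRange_one_singleton]
    simp only [List.foldl_cons, List.foldl_nil]
    have h0 := B_inner arr m hm hlen 0
    rw [show ((0:Nat) : Int) = (0:Int) from by norm_num] at h0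
    rw [h0]
    simp [Mx]
  | succ j ih =>
    intro hj
    rw [show ((j + 1 : Nat) : Int) + 1 = (((j : Int) + 1) + 1) from by push_cast; ring,
      PySem.List.pyRange_one_succ_right (by omega), List.foldl_append, ih (by omega)]
    simp only [List.foldl_cons, List.foldl_nil]
    rw [show ((j : Int) + 1) = ((j + 1 : Nat) : Int) by push_cast; ring,
      B_inner arr m hm hlen (j + 1)]
    rw [Mx]
    by_cases h : Mx (arr.take m) j < ws 0 ((arr.take m).rotate (j + 1))
    · rw [if_pos (by omega), max_eq_right (by omega)]
    · rw [if_neg (by omega), max_eq_left (by omega)]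

-- A's first two loops
theorem loop_sum (g : Int → Int) (m : Nat) :
    (PySem.List.pyRange 0 (m : Int) 1).foldl (fun a i => a + g i) 0
      = ((List.range m).map (fun (k : Nat) => g (k : Int))).sum := by
  induction m with
  | zero => rw [show ((0:Nat) : Int) = 0 by norm_num, PySem.List.pyRange_one_eq_nil (by norm_num)]; simp
  | succ m ih =>
    rw [show ((m + 1 : Nat) : Int) = (m : Int) + 1 by push_cast; ring,
      PySem.List.pyRange_one_succ_right (by omega), List.foldl_append, ih,
      List.range_succ]
    simp

-- ===== VERDICT (by name: the statement is the Claim_ definition above) =====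
theorem maxSumEfficient_spec : Claim_equal_maxSumEfficient := by
  intro arr n _ hpre
  unfold Spec_maxSumEfficient maxSumEfficient maxSumEfficient_alt
  by_cases hn : n ≤ 0
  · rw [if_pos hn]
    rw [PySem.List.pyRange_one_eq_nil (by omega), PySem.List.pyRange_one_eq_nil (by omega)]
    simp
  · rw [if_neg (by omega)]
    replace hn : 0 < n := by omega
    set m := n.toNat with hm
    have hn' : n = (m : Int) := by omega
    have hm0 : 0 < m := by omega
    have hlen : m ≤ arr.length := by
      unfold Pre_maxSumEfficient at hpre; omega
    set l := arr.take m with hl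
    have hml : l.length = m := by simp [hl]; omega
    have hlne : l ≠ [] := by
      intro h; rw [h] at hml; simp at hml; omega
    -- cum_sum
    have hcum : (PySem.List.pyRange 0 n 1).foldl (fun acc i => acc + PySem.List.pyGetD arr i 0) 0
        = l.sum := by
      rw [hn', loop_sum (fun i => PySem.List.pyGetD arr i 0) m]
      rw [sum_eq_map_range l, hml]
      apply congrArg; apply List.map_congr_left; intro i hi
      simp only [List.mem_range] at hi
      rw [show PySem.List.pyGetD arr ((i : Nat) : Int) 0 = arr.getD i 0 by simp [PySem.List.pyGetD_natCast]]
      rw [List.getD_eq_getElem arr _ (by omega), List.getD_eq_getElem l _ (by omega)]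
      simp [hl, List.getElem_take]
    -- curr_val
    have hcurr : (PySem.List.pyRange 0 n 1).foldl (fun acc i => acc + i * PySem.List.pyGetD arr i 0) 0
        = ws 0 l := by
      rw [hn', loop_sum (fun i => i * PySem.List.pyGetD arr i 0) m]
      rw [ws_eq_sum l 0, hml]
      apply congrArg; apply List.map_congr_left; intro i hi
      simp only [List.mem_range] at hi
      rw [show PySem.List.pyGetD arr ((i : Nat) : Int) 0 = arr.getD i 0 by simp [PySem.List.pyGetD_natCast]]
      rw [List.getD_eq_getElem arr _ (by omega), List.getD_eq_getElem l _ (by omega)]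
      simp [hl, List.getElem_take]
    simp only [hcum, hcurr]
    -- A's third loop: indices are in [1, n); pyGetD arr (i-1) = pyGetD l (i-1) there
    have hAbody : (PySem.List.pyRange 1 n 1).foldl (fun (p : Int × Int) i =>
          let next_val := p.1 - (l.sum - PySem.List.pyGetD arr (i - 1) 0)
                          + PySem.List.pyGetD arr (i - 1) 0 * (n - 1)
          (next_val, max p.2 next_val)) (ws 0 l, ws 0 l)
        = (PySem.List.pyRange 1 n 1).foldl (fun (p : Int × Int) i =>
          let next_val := p.1 - (l.sum - PySem.List.pyGetD l (i - 1) 0)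
                          + PySem.List.pyGetD l (i - 1) 0 * ((l.length : Int) - 1)
          (next_val, max p.2 next_val)) (ws 0 l, ws 0 l) := by
      apply PySem.List.foldl_congr_mem
      intro p i hi
      rw [PySem.List.mem_pyRange_one] at hi
      have hig : PySem.List.pyGetD arr (i - 1) 0 = PySem.List.pyGetD l (i - 1) 0 := by
        have h0 : (0:Int) ≤ i - 1 := by omega
        have h1 : i - 1 < (l.length : Int) := by omega
        rw [PySem.List.pyGetD_eq_getElem arr 0 h0 (by omega),
          PySem.List.pyGetD_eq_getElem l 0 h0 (by rw [hml]; omega)]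
        simp [hl, List.getElem_take]
      rw [hig, hml, hn']
    rw [hAbody]
    have hA := A_loop l hlne l.sum rfl (m - 1) (by omega)
    rw [show ((m - 1 : Nat) : Int) + 1 = n by omega] at hA
    rw [hA]
    have hB := B_outer arr m hm0 hlen (m - 1) (by omega)
    rw [show ((m - 1 : Nat) : Int) + 1 = n by omega, hn'] at hB
    rw [hn']
    rw [hB]
    simp
    rfl
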